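-- pv_equiv track=rewrite | github.com/koba925/alds | atcoder/ABC038/C.py | tancho
-- ===== SOURCE A (Python) =====
-- def tancho(N, A):
--     left, right, count = 0, 0, 0
--
--     while left < N:
--         while right < N - 1 and A[right] < A[right + 1]:
--             right += 1
--         l = right - left + 1
--         # count += l * (l + 1) // 2
--         # left = right = right + 1
--         count += l
--         left += 1
--         right = max(right, left)
--
--     return count
-- ===== SOURCE B (Python) =====
-- def tancho(N, A):
--     # Single pass over maximal strictly-increasing runs; each run of length L
--     # contributes L*(L+1)//2 via the closed form, instead of A's two-pointer
--     # per-left length accumulation.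
--     count = 0
--     run = 0
--     for i in range(N):
--         if i > 0 and A[i - 1] < A[i]:
--             run += 1
--         else:
--             count += run * (run + 1) // 2
--             run = 1
--     return count + run * (run + 1) // 2
-- ===== Notes on version B (the rewrite author's own statement) =====
-- stated objective: simpler
-- what changed: Replaces A's two-pointer loop (which re-adds the remaining run length for every left index) with a single forward pass over maximal strictly-increasing runs, adding the closed form L*(L+1)//2 once per run.
import Mathlib
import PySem

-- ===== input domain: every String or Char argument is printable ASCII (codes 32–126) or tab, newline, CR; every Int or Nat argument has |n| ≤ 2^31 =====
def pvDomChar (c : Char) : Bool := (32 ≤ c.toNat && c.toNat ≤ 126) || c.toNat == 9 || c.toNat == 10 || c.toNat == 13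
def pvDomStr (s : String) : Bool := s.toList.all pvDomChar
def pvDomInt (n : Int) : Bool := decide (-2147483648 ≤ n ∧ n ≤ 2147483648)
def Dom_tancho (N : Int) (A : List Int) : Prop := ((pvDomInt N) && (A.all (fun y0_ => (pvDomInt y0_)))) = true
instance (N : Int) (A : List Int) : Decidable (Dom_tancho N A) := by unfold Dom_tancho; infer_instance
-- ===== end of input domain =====

-- B replaces A's two-pointer per-left accumulation by a single pass over maximal
-- strictly-increasing runs, adding the closed form L*(L+1)//2 per run (objective: simpler).

-- ===== PORT A =====
-- inner 'while right < N - 1 and A[right] < A[right + 1]' loop of A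
def tanchoInner (N : Int) (A : List Int) (right : Int) : Int :=
  if h : right < N - 1 ∧ PySem.List.pyGetD A right 0 < PySem.List.pyGetD A (right + 1) 0 then
    tanchoInner N A (right + 1)
  else right
termination_by (N - 1 - right).toNat
decreasing_by omega

-- outer 'while left < N' loop of A
def tanchoOuter (N : Int) (A : List Int) (left right count : Int) : Int :=
  if h : left < N then
    tanchoOuter N A (left + 1) (max (tanchoInner N A right) (left + 1))
      (count + (tanchoInner N A right - left + 1))
  else count
termination_by (N - left).toNat
decreasing_by omega

def tancho (N : Int) (A : List Int) : Int := tanchoOuter N A 0 0 0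

-- ===== PORT B =====
-- loop body of B: state (count, run), visiting index i
def tanchoStep (A : List Int) (st : Int × Int) (i : Int) : Int × Int :=
  if 0 < i ∧ PySem.List.pyGetD A (i - 1) 0 < PySem.List.pyGetD A i 0 then
    (st.1, st.2 + 1)
  else
    (st.1 + PySem.Int.floordiv (st.2 * (st.2 + 1)) 2, 1)

def tancho_alt (N : Int) (A : List Int) : Int :=
  let s := (PySem.List.pyRange 0 N 1).foldl (tanchoStep A) (0, 0)
  s.1 + PySem.Int.floordiv (s.2 * (s.2 + 1)) 2

-- ===== PRECONDITION & SPEC =====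
-- Pre_ excludes exactly the inputs (N ≥ 2 and N > len(A)) on which the Python A
-- raises IndexError (B raises there too).
def Pre_tancho (N : Int) (A : List Int) : Prop := N ≤ (A.length : Int) ∨ N ≤ 1
instance (N : Int) (A : List Int) : Decidable (Pre_tancho N A) := by unfold Pre_tancho; infer_instance
def pvWitness_tancho : Int × List Int := (4, [3, 1, 2, 4])

def Spec_tancho (N : Int) (A : List Int) (out : Int) : Prop := out = tancho_alt N A
instance (N : Int) (A : List Int) (out : Int) : Decidable (Spec_tancho N A out) := by unfold Spec_tancho; infer_instance

-- ===== CLAIM (what is proved, stated in full; the proofs are below) =====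
def Claim_equal_tancho : Prop := ∀ (N : Int) (A : List Int), Dom_tancho N A → Pre_tancho N A → Spec_tancho N A (tancho N A)

-- ===== LEMMAS AND PROOFS =====

-- the common spec: sum over left of (run-end from left) - left + 1
def specSum (N : Int) (A : List Int) (left : Int) : Int :=
  if h : left < N then (tanchoInner N A left - left + 1) + specSum N A (left + 1) else 0
termination_by (N - left).toNat
decreasing_by omega

def tri (r : Int) : Int := PySem.Int.floordiv (r * (r + 1)) 2

theorem tri_zero : tri 0 = 0 := by decide
theorem tri_one : tri 1 = 1 := by decide

theorem tri_succ (d : Int) : tri (d + 1) = (d + 1) + tri d := by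
  unfold tri
  rw [PySem.Int.floordiv_eq_ediv_of_pos (by omega), PySem.Int.floordiv_eq_ediv_of_pos (by omega)]
  rw [show (d + 1) * (d + 1 + 1) = d * (d + 1) + (d + 1) * 2 by ring]
  rw [Int.add_mul_ediv_right _ _ (by norm_num)]
  ring

theorem inner_ge (N : Int) (A : List Int) (r : Int) : r ≤ tanchoInner N A r := by
  fun_induction tanchoInner N A r <;> omega

theorem inner_le (N : Int) (A : List Int) (r : Int) (h : r ≤ N - 1) :
    tanchoInner N A r ≤ N - 1 := by
  fun_induction tanchoInner N A r <;> omega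

theorem inner_stable (N : Int) (A : List Int) (r : Int) :
    ¬(tanchoInner N A r < N - 1 ∧
      PySem.List.pyGetD A (tanchoInner N A r) 0 < PySem.List.pyGetD A (tanchoInner N A r + 1) 0) := by
  fun_induction tanchoInner N A r with
  | case1 r h ih => exact ih
  | case2 r h => exact h

theorem inner_incr (N : Int) (A : List Int) (r : Int) :
    ∀ j, r ≤ j → j < tanchoInner N A r →
      PySem.List.pyGetD A j 0 < PySem.List.pyGetD A (j + 1) 0 := by
  fun_induction tanchoInner N A r with
  | case1 r h ih =>
    intro j hj1 hj2
    rcases eq_or_lt_of_le hj1 with rfl | hlt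
    · exact h.2
    · exact ih j (by omega) hj2
  | case2 r h => intro j hj1 hj2; omega

theorem inner_char (N : Int) (A : List Int) (r s : Int) (hrs : r ≤ s) (hsN : s ≤ N - 1)
    (hincr : ∀ j, r ≤ j → j < s → PySem.List.pyGetD A j 0 < PySem.List.pyGetD A (j + 1) 0)
    (hstop : ¬(s < N - 1 ∧ PySem.List.pyGetD A s 0 < PySem.List.pyGetD A (s + 1) 0)) :
    tanchoInner N A r = s := by
  fun_induction tanchoInner N A r with
  | case1 r h ih =>
    rcases eq_or_lt_of_le hrs with rfl | hlt
    · exact absurd h hstop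
    · exact ih (by omega) (fun j hj1 hj2 => hincr j (by omega) hj2)
  | case2 r h =>
    rcases eq_or_lt_of_le hrs with rfl | hlt
    · rfl
    · exact absurd ⟨by omega, hincr r le_rfl hlt⟩ h

theorem specSum_nil (N : Int) (A : List Int) (left : Int) (h : N ≤ left) :
    specSum N A left = 0 := by
  rw [specSum, dif_neg (by omega)]

theorem outer_eq (N : Int) (A : List Int) (fuel : Nat) :
    ∀ (left right count : Int), (N - left).toNat ≤ fuel → left ≤ right → right ≤ N - 1 →
      (∀ j, left ≤ j → j < right → PySem.List.pyGetD A j 0 < PySem.List.pyGetD A (j + 1) 0) →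
      tanchoOuter N A left right count = count + specSum N A left := by
  induction fuel with
  | zero =>
    intro left right count hf h1 h2 h3
    rw [tanchoOuter, dif_neg (by omega), specSum_nil N A left (by omega)]; ring
  | succ fuel ih =>
    intro left right count hf h1 h2 h3
    by_cases hlt : left < N
    · rw [tanchoOuter, dif_pos hlt]
      have hr : tanchoInner N A left = tanchoInner N A right := by
        apply inner_char
        · exact le_trans h1 (inner_ge N A right)
        · exact inner_le N A right h2
        · intro j hj1 hj2
          by_cases hjr : j < right
          · exact h3 j hj1 hjr
          · exact inner_incr N A right j (by omega) hj2
        · exact inner_stable N A right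
      by_cases hlt2 : left + 1 < N
      · rw [ih (left + 1) (max (tanchoInner N A right) (left + 1))
              (count + (tanchoInner N A right - left + 1)) (by omega)
              (le_max_right _ _) (by have := inner_le N A right h2; omega) ?_]
        · conv_rhs => rw [specSum]
          rw [dif_pos hlt, hr]; ring
        · intro j hj1 hj2
          have hj3 : j < tanchoInner N A right := by omega
          rw [← hr] at hj3
          exact inner_incr N A left j (by omega) (by rw [hr]; omega)
      · rw [tanchoOuter, dif_neg (by omega)]
        conv_rhs => rw [specSum]
        rw [dif_pos hlt, specSum_nil N A (left + 1) (by omega), hr]; ring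
    · rw [tanchoOuter, dif_neg hlt, specSum_nil N A left (by omega)]; ring

theorem A_eq (N : Int) (A : List Int) : tancho N A = specSum N A 0 := by
  unfold tancho
  by_cases h : 0 < N
  · rw [outer_eq N A (N - 0).toNat 0 0 0 le_rfl le_rfl (by omega) (by intro j h1 h2; omega)]
    ring
  · rw [tanchoOuter, dif_neg (by omega), specSum_nil N A 0 (by omega)]

theorem extend_fold (A : List Int) (e : Int) (fuel : Nat) :
    ∀ (q c r : Int), (e + 1 - q).toNat ≤ fuel → q ≤ e + 1 →
      (∀ j, q ≤ j → j ≤ e → 0 < j ∧ PySem.List.pyGetD A (j - 1) 0 < PySem.List.pyGetD A j 0) →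
      (PySem.List.pyRange q (e + 1) 1).foldl (tanchoStep A) (c, r) = (c, r + (e + 1 - q)) := by
  induction fuel with
  | zero =>
    intro q c r hf h1 h2
    rw [PySem.List.pyRange_one_eq_nil (by omega), List.foldl_nil]
    have : e + 1 - q = 0 := by omega
    rw [this]; ring_nf
  | succ fuel ih =>
    intro q c r hf h1 h2
    by_cases hq : q < e + 1
    · rw [PySem.List.pyRange_one_cons hq, List.foldl_cons]
      have hc := h2 q le_rfl (by omega)
      rw [show tanchoStep A (c, r) q = (c, r + 1) by unfold tanchoStep; rw [if_pos hc]]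
      rw [ih (q + 1) c (r + 1) (by omega) (by omega) (fun j hj1 hj2 => h2 j (by omega) hj2)]
      congr 1; ring
    · rw [PySem.List.pyRange_one_eq_nil (by omega), List.foldl_nil]
      have : e + 1 - q = 0 := by omega
      rw [this]; ring_nf

theorem specSum_run (N : Int) (A : List Int) (p e : Int) (hpe : p ≤ e) (he : e ≤ N - 1)
    (hincr : ∀ j, p ≤ j → j < e → PySem.List.pyGetD A j 0 < PySem.List.pyGetD A (j + 1) 0)
    (hstop : ¬(e < N - 1 ∧ PySem.List.pyGetD A e 0 < PySem.List.pyGetD A (e + 1) 0)) :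
    ∀ (fuel : Nat) (q : Int), (e - q).toNat ≤ fuel → p ≤ q → q ≤ e →
      specSum N A q = tri (e - q + 1) + specSum N A (e + 1) := by
  intro fuel
  induction fuel with
  | zero =>
    intro q hf h1 h2
    have hq : q = e := by omega
    subst hq
    rw [specSum, dif_pos (by omega),
        inner_char N A q q le_rfl he (by intro j hj1 hj2; omega) hstop]
    simp [tri_one]
  | succ fuel ih =>
    intro q hf h1 h2
    have hIq : tanchoInner N A q = e :=
      inner_char N A q e h2 he (fun j hj1 hj2 => hincr j (by omega) hj2) hstop
    rcases eq_or_lt_of_le h2 with rfl | hlt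
    · rw [specSum, dif_pos (by omega), hIq]
      simp [tri_one]
    · rw [specSum, dif_pos (by omega), hIq,
          ih (q + 1) (by omega) (by omega) (by omega),
          tri_succ (e - q)]
      ring

theorem B_sum (N : Int) (A : List Int) (fuel : Nat) :
    ∀ (p c run : Int), (N - p).toNat ≤ fuel → 0 ≤ p → p < N →
      (p = 0 ∨ ¬(PySem.List.pyGetD A (p - 1) 0 < PySem.List.pyGetD A p 0)) →
      (let s := (PySem.List.pyRange p N 1).foldl (tanchoStep A) (c, run)
       s.1 + tri s.2) = c + tri run + specSum N A p := by
  induction fuel with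
  | zero => intro p c run hf h0 h1 h2; omega
  | succ fuel ih =>
    intro p c run hf h0 h1 h2
    have hpe : p ≤ tanchoInner N A p := inner_ge N A p
    have heN : tanchoInner N A p ≤ N - 1 := inner_le N A p (by omega)
    have hstop := inner_stable N A p
    have hincr := inner_incr N A p
    set e := tanchoInner N A p with hedef
    have hsplit : PySem.List.pyRange p N 1 =
        PySem.List.pyRange p (e + 1) 1 ++ PySem.List.pyRange (e + 1) N 1 :=
      PySem.List.pyRange_one_append p (e + 1) N (by omega) (by omega)
    have hfirst : (PySem.List.pyRange p (e + 1) 1).foldl (tanchoStep A) (c, run) =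
        (c + tri run, e - p + 1) := by
      rw [PySem.List.pyRange_one_cons (by omega), List.foldl_cons]
      have hflush : tanchoStep A (c, run) p = (c + tri run, 1) := by
        unfold tanchoStep
        rw [if_neg ?_]
        · rfl
        · rcases h2 with rfl | h2
          · simp
          · intro hcon; exact h2 hcon.2
      rw [hflush, extend_fold A e (e + 1 - (p + 1)).toNat (p + 1) (c + tri run) 1 le_rfl
            (by omega) ?_]
      · congr 1; ring
      · intro j hj1 hj2
        refine ⟨by omega, ?_⟩
        have := hincr (j - 1) (by omega) (by omega)
        simpa using this
    simp only [hsplit, List.foldl_append, hfirst]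
    have hsrun := specSum_run N A p e hpe heN hincr hstop (e - p).toNat p le_rfl le_rfl hpe
    by_cases hend : e + 1 < N
    · rw [ih (e + 1) (c + tri run) (e - p + 1) (by omega) (by omega) hend ?_]
      · rw [hsrun]; ring
      · right; intro hcon
        have : ¬(e < N - 1 ∧ PySem.List.pyGetD A e 0 < PySem.List.pyGetD A (e + 1) 0) := hstop
        apply this
        constructor
        · omega
        · simpa using hcon
    · rw [PySem.List.pyRange_one_eq_nil (by omega), List.foldl_nil]
      rw [hsrun, specSum_nil N A (e + 1) (by omega)]
      ring

theorem B_eq (N : Int) (A : List Int) : tancho_alt N A = specSum N A 0 := by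
  by_cases h : 0 < N
  · have hB := B_sum N A N.toNat 0 0 0 (by omega) le_rfl h (Or.inl rfl)
    rw [tri_zero, zero_add, zero_add] at hB
    unfold tri at hB
    simp only [tancho_alt]
    exact hB
  · have hnil : PySem.List.pyRange 0 N 1 = [] := PySem.List.pyRange_one_eq_nil (by omega)
    rw [specSum_nil N A 0 (by omega)]
    simp only [tancho_alt, hnil, List.foldl_nil]
    decide

-- ===== VERDICT (by name: the statement is the Claim_ definition above) =====
theorem tancho_spec : Claim_equal_tancho := by
  intro N A hdom hpre
  unfold Spec_tancho
  rw [A_eq, B_eq]
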